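-- pv_equiv track=rewrite | github.com/omung789/FPL-Player-Points-Predictor | best_teams/best_team_no_transfers.py | max_3_per_team
-- ===== SOURCE A (Python) =====
-- def max_3_per_team(players):
--     team_count = {}
--     for player in players:
--         if player[1] in team_count:
--             team_count[player[1]] += 1
--         else:
--             team_count[player[1]] = 1
--     return max(team_count.values()) <= 3
-- ===== SOURCE B (Python) =====
-- def max_3_per_team(players):
--     # simpler: check every player's team occurs at most 3 times, directly by counting
--     teams = [p[1] for p in players]
--     return all(teams.count(t) <= 3 for t in teams)
-- ===== Notes on version B (the rewrite author's own statement) =====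
-- stated objective: simpler
-- what changed: B drops the hash-map counting pass and the max over its values: it checks directly that each player's team id occurs at most 3 times in the list of team ids (all/count), which also quietly returns True on the empty list where A raises ValueError.
import Mathlib
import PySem

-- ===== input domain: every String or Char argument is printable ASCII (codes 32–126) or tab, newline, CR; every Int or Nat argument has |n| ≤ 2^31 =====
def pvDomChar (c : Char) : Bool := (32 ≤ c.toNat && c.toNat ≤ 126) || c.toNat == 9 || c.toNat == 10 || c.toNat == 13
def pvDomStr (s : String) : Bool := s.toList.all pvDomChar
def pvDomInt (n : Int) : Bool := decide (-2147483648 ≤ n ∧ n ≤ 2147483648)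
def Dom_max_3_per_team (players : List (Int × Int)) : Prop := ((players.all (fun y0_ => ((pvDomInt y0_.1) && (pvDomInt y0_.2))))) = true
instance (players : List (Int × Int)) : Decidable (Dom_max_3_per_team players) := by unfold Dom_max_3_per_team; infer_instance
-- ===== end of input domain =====

-- B replaces A's hash-map counting + max-of-values with a direct all/count check over the team ids (simpler; B returns True on the empty list where A raises ValueError).


-- ===== PORT A =====
def max_3_per_team (players : List (Int × Int)) : Bool :=
  let team_count : PySem.Dict Int Int :=
    players.foldl (fun d player =>
      if d.contains player.2 then d.modify player.2 0 (· + 1) else d.insert player.2 1)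
      PySem.Dict.empty
  match PySem.List.max? team_count.values (fun y => y) with
  | some m => decide (m ≤ 3)
  | none => false   -- unreachable under Pre_: Python raises ValueError on max of empty

-- ===== PORT B =====
def max_3_per_team_alt (players : List (Int × Int)) : Bool :=
  let teams := players.map (fun p => p.2)
  teams.all (fun t => decide ((PySem.List.count teams t : Int) ≤ 3))

-- ===== PRECONDITION & SPEC =====
-- A raises ValueError on the empty list (max of an empty sequence); Pre_ excludes exactly that input.
def Pre_max_3_per_team (players : List (Int × Int)) : Prop := players ≠ []
instance (players : List (Int × Int)) : Decidable (Pre_max_3_per_team players) := by unfold Pre_max_3_per_team; infer_instance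
def pvWitness_max_3_per_team : (List (Int × Int)) := [(7, 1), (9, 1)]

def Spec_max_3_per_team (players : List (Int × Int)) (out : Bool) : Prop := out = max_3_per_team_alt players
instance (players : List (Int × Int)) (out : Bool) : Decidable (Spec_max_3_per_team players out) := by unfold Spec_max_3_per_team; infer_instance

-- ===== CLAIM (what is proved, stated in full; the proofs are below) =====
def Claim_equal_max_3_per_team : Prop := ∀ (players : List (Int × Int)), Dom_max_3_per_team players → Pre_max_3_per_team players → Spec_max_3_per_team players (max_3_per_team players)

-- ===== LEMMAS AND PROOFS =====

-- A's loop body IS the Counter step: present key → modify, absent key → insert 1 = modify with default 0.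
theorem step_eq_modify (d : PySem.Dict Int Int) (x : Int) :
    (if d.contains x then d.modify x 0 (· + 1) else d.insert x 1) = d.modify x 0 (· + 1) := by
  by_cases h : d.contains x = true
  · simp [h]
  · simp only [Bool.not_eq_true] at h
    simp [h, PySem.Dict.modify, PySem.Dict.getD_of_not_contains d 0 h]

theorem dict_eq_counter (players : List (Int × Int)) :
    players.foldl (fun d player =>
      if d.contains player.2 then d.modify player.2 0 (· + 1) else d.insert player.2 1)
      PySem.Dict.empty
    = PySem.Dict.counter (players.map (fun p => p.2)) := by
  rw [PySem.Dict.counter_eq_foldl, List.foldl_map]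
  exact PySem.List.foldl_congr_mem _ _ _ _ (fun d p _ => step_eq_modify d p.2)

-- ===== VERDICT (by name: the statement is the Claim_ definition above) =====
theorem max_3_per_team_spec : Claim_equal_max_3_per_team := by
  intro players _ hpre
  unfold Spec_max_3_per_team max_3_per_team max_3_per_team_alt
  rw [dict_eq_counter]
  set teams := players.map (fun p => p.2) with hteams
  show (match PySem.List.max? (PySem.Dict.counter teams).values (fun y => y) with
        | some m => decide (m ≤ 3) | none => false)
      = teams.all (fun t => decide ((PySem.List.count teams t : Int) ≤ 3))
  have hne : teams ≠ [] := by
    simp [hteams, Pre_max_3_per_team] at hpre ⊢; exact hpre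
  have hvals : (PySem.Dict.counter teams).values
      = (PySem.Set.ofList teams).map (fun k => ((teams.count k : Int))) := by
    show (PySem.Dict.counter teams).items.map (fun p => p.2) = _
    rw [PySem.Dict.items_counter]
    simp
  cases hmax : PySem.List.max? (PySem.Dict.counter teams).values (fun y => y) with
  | none =>
      exfalso
      rw [PySem.List.max?_eq_none_iff, hvals, List.map_eq_nil_iff] at hmax
      rcases List.exists_mem_of_ne_nil teams hne with ⟨t, ht⟩
      have : t ∈ PySem.Set.ofList teams := (PySem.Set.mem_ofList teams t).mpr ht
      rw [hmax] at this
      exact (List.not_mem_nil this)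
  | some m =>
      show decide (m ≤ 3) = teams.all (fun t => decide ((PySem.List.count teams t : Int) ≤ 3))
      have hmem := PySem.List.max?_mem hmax
      have hmaxle := PySem.List.max?_isMax hmax
      rw [Bool.eq_iff_iff]
      simp only [decide_eq_true_eq, List.all_eq_true]
      constructor
      · intro hm3 t ht
        have : ((teams.count t : Int)) ∈ (PySem.Dict.counter teams).values := by
          rw [hvals]
          exact List.mem_map_of_mem ((PySem.Set.mem_ofList teams t).mpr ht)
        exact le_trans (hmaxle _ this) hm3
      · intro hall
        rw [hvals] at hmem
        rcases List.mem_map.mp hmem with ⟨k, hk, hkm⟩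
        have hk' : k ∈ teams := (PySem.Set.mem_ofList teams k).mp hk
        have := hall k hk'
        simpa [← hkm] using this
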